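-- pv_equiv track=rewrite | github.com/wawaforeverlove/math-review-system123456 | review_path_recommender.py | _distribute_to_days
-- ===== SOURCE A (Python) =====
-- def _distribute_to_days(topics, days):
--     """将知识点分配到每天"""
--     if not topics:
--         return {}
--
--     daily_dist = {}
--     topics_per_day = max(1, len(topics) // days)
--
--     for day in range(1, min(days, len(topics)) + 1):
--         start_idx = (day - 1) * topics_per_day
--         end_idx = min(start_idx + topics_per_day, len(topics))
--         daily_dist[f"第{day}天"] = topics[start_idx:end_idx]
--
--     return daily_dist
-- ===== SOURCE B (Python) =====
-- def _distribute_to_days(topics, days):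
--     """将知识点分配到每天 — recursive: peel off one day's chunk from the front each step."""
--     if not topics:
--         return {}
--     topics_per_day = max(1, len(topics) // days)
--     num_days = min(days, len(topics))
--
--     def chunks(rest, day):
--         if day > num_days or not rest:
--             return []
--         return [(f"第{day}天", rest[:topics_per_day])] + chunks(rest[topics_per_day:], day + 1)
--
--     return dict(chunks(topics, 1))
-- ===== Notes on version B (the rewrite author's own statement) =====
-- stated objective: alternative
-- what changed: A slices topics by computed start/end indices inside a for-loop over day numbers; B instead peels each day's chunk off the front of the remaining list by a recursion (rest[:tpd] / rest[tpd:]) and builds the day->topics pairs as a list turned into a dict at the end.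
import Mathlib
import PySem

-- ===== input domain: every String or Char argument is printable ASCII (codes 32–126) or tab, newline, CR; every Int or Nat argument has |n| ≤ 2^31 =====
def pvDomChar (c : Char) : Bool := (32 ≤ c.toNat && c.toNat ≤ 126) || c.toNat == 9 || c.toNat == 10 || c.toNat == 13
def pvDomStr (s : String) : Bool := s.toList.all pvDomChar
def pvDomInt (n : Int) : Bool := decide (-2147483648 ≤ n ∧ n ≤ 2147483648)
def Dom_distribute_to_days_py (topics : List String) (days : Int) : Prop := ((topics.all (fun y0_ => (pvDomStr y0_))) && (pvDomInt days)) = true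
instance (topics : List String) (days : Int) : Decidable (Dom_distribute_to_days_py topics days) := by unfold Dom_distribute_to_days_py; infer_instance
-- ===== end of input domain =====

-- B replaces A's index-arithmetic slicing loop by a recursion that peels each day's chunk
-- off the front of the remaining list (objective: alternative decomposition, same cost).

-- key f"第{day}天" (shared literal f-string of both programs)
def pvDayKey (day : Int) : String := "第" ++ PySem.Int.toStr day ++ "天"

-- ===== PORT A =====
def distribute_to_days_py (topics : List String) (days : Int) : List (String × List String) :=
  if topics = [] then []
  else
    let tpd : Int := max 1 (PySem.Int.floordiv (PySem.List.len topics) days)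
    ((PySem.List.pyRange 1 (min days (PySem.List.len topics) + 1) 1).foldl
      (fun daily_dist day =>
        daily_dist.insert (pvDayKey day)
          (PySem.List.slice topics (some ((day - 1) * tpd))
            (some (min ((day - 1) * tpd + tpd) (PySem.List.len topics)))))
      PySem.Dict.empty).items

-- ===== PORT B =====
-- chunks(rest, day): peel rest[:tpd] as day's bucket, recurse on rest[tpd:]
def pvChunks (tpd nd : Int) (rest : List String) (day : Int) : List (String × List String) :=
  if h : day > nd ∨ rest = [] then []
  else (pvDayKey day, PySem.List.slice rest none (some tpd)) ::
    pvChunks tpd nd (PySem.List.slice rest (some tpd) none) (day + 1)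
termination_by (nd + 1 - day).toNat
decreasing_by push Not at h; omega

def distribute_to_days_py_alt (topics : List String) (days : Int) : List (String × List String) :=
  if topics = [] then []
  else
    let tpd : Int := max 1 (PySem.Int.floordiv (PySem.List.len topics) days)
    let nd : Int := min days (PySem.List.len topics)
    (PySem.Dict.ofList (pvChunks tpd nd topics 1)).items

-- ===== PRECONDITION & SPEC =====
-- Pre_ excludes exactly days = 0 with nonempty topics, where the Python A raises
-- ZeroDivisionError (B raises there too).
def Pre_distribute_to_days_py (topics : List String) (days : Int) : Prop :=
  topics = [] ∨ days ≠ 0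
instance (topics : List String) (days : Int) : Decidable (Pre_distribute_to_days_py topics days) := by unfold Pre_distribute_to_days_py; infer_instance

def pvWitness_distribute_to_days_py : List String × Int := (["a", "b", "c"], 2)

def Spec_distribute_to_days_py (topics : List String) (days : Int) (out : List (String × List String)) : Prop := out = distribute_to_days_py_alt topics days
instance (topics : List String) (days : Int) (out : List (String × List String)) : Decidable (Spec_distribute_to_days_py topics days out) := by unfold Spec_distribute_to_days_py; infer_instance

-- ===== CLAIM (what is proved, stated in full; the proofs are below) =====
def Claim_equal_distribute_to_days_py : Prop := ∀ (topics : List String) (days : Int), Dom_distribute_to_days_py topics days → Pre_distribute_to_days_py topics days → Spec_distribute_to_days_py topics days (distribute_to_days_py topics days)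

-- ===== LEMMAS AND PROOFS =====

-- abbreviations (proof-only) for the two derived quantities of both programs
def pvTpd (topics : List String) (days : Int) : Int :=
  max 1 (PySem.Int.floordiv (PySem.List.len topics) days)
def pvNd (topics : List String) (days : Int) : Int :=
  min days (PySem.List.len topics)

-- the entry A's loop inserts for a given day
def pvEntry (topics : List String) (days : Int) (day : Int) : String × List String :=
  (pvDayKey day,
    PySem.List.slice topics (some ((day - 1) * pvTpd topics days))
      (some (min ((day - 1) * pvTpd topics days + pvTpd topics days) (PySem.List.len topics))))

-- each day 1 ≤ d ≤ nd has a nonempty slice: its start index is < len(topics)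
lemma pv_start_lt (topics : List String) (days d : Int) (h1 : 1 ≤ d)
    (h2 : d ≤ pvNd topics days) :
    (d - 1) * pvTpd topics days < PySem.List.len topics := by
  have hN : PySem.List.len topics = (topics.length : Int) := PySem.List.len_eq topics
  have hdays : 0 < days := by unfold pvNd at h2; omega
  have hfd : PySem.Int.floordiv (PySem.List.len topics) days = PySem.List.len topics / days :=
    PySem.Int.floordiv_eq_ediv_of_pos hdays
  set N : Int := PySem.List.len topics with hNdef
  set q : Int := N / days with hq
  have hqr : days * q + N % days = N := Int.mul_ediv_add_emod N days
  have hr : 0 ≤ N % days := Int.emod_nonneg N (by omega)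
  have hdn : d ≤ days ∧ d ≤ N := by unfold pvNd at h2; omega
  unfold pvTpd
  rw [hfd]
  by_cases hq1 : q ≤ 1
  · have hmax : max 1 q = 1 := by omega
    rw [hmax]; omega
  · have hmax : max 1 q = q := by omega
    rw [hmax]
    have h1' : (d - 1) * q ≤ (days - 1) * q :=
      mul_le_mul_of_nonneg_right (by omega) (by omega)
    have h2' : (days - 1) * q = days * q - q := by ring
    omega

-- B's chunk recursion, started at day d on the list with the first (d-1)*tpd topics removed,
-- produces exactly the entries A inserts for days d, d+1, …, nd
lemma pvChunks_eq (topics : List String) (days : Int) :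
    ∀ (k : Nat) (d : Int), 1 ≤ d → (pvNd topics days + 1 - d).toNat = k →
      pvChunks (pvTpd topics days) (pvNd topics days)
        (topics.drop ((d - 1) * pvTpd topics days).toNat) d
        = (PySem.List.pyRange d (pvNd topics days + 1) 1).map (pvEntry topics days) := by
  intro k
  induction k with
  | zero =>
    intro d h1 hk
    rw [pvChunks, dif_pos (Or.inl (by omega)),
      PySem.List.pyRange_one_eq_nil (by omega)]
    rfl
  | succ k ih =>
    intro d h1 hk
    have hdle : d ≤ pvNd topics days := by omega
    have htpd : 1 ≤ pvTpd topics days := le_max_left 1 _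
    have hstart : (d - 1) * pvTpd topics days < PySem.List.len topics :=
      pv_start_lt topics days d h1 hdle
    have hstart0 : 0 ≤ (d - 1) * pvTpd topics days := mul_nonneg (by omega) (by omega)
    have hN : PySem.List.len topics = (topics.length : Int) := PySem.List.len_eq topics
    have hlen : (topics.drop ((d - 1) * pvTpd topics days).toNat).length
        = topics.length - ((d - 1) * pvTpd topics days).toNat := by simp
    have hne : topics.drop ((d - 1) * pvTpd topics days).toNat ≠ [] := by
      intro hnil
      rw [hnil] at hlen
      simp at hlen
      omega
    rw [pvChunks, dif_neg (by push Not; exact ⟨by omega, hne⟩),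
      PySem.List.pyRange_one_cons (by omega), List.map_cons]
    congr 1
    · -- the head entry
      unfold pvEntry
      congr 1
      rw [PySem.List.slice_to (topics.drop ((d - 1) * pvTpd topics days).toNat) (by omega),
        PySem.List.slice_toNat topics hstart0 (by omega)]
      by_cases hc : (d - 1) * pvTpd topics days + pvTpd topics days
          ≤ PySem.List.len topics
      · have heq : (min ((d - 1) * pvTpd topics days + pvTpd topics days)
            (PySem.List.len topics)).toNat - ((d - 1) * pvTpd topics days).toNat
            = (pvTpd topics days).toNat := by omega
        rw [heq]
      · have hl1 := List.take_of_length_le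
          (l := topics.drop ((d - 1) * pvTpd topics days).toNat)
          (i := (pvTpd topics days).toNat) (by omega)
        have hl2 := List.take_of_length_le
          (l := topics.drop ((d - 1) * pvTpd topics days).toNat)
          (i := (min ((d - 1) * pvTpd topics days + pvTpd topics days)
            (PySem.List.len topics)).toNat - ((d - 1) * pvTpd topics days).toNat) (by omega)
        rw [hl1, hl2]
    · -- the tail
      rw [PySem.List.slice_from (topics.drop ((d - 1) * pvTpd topics days).toNat) (by omega)]
      have hmul : (d + 1 - 1) * pvTpd topics days
          = (d - 1) * pvTpd topics days + pvTpd topics days := by ring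
      have hdd : (topics.drop ((d - 1) * pvTpd topics days).toNat).drop
          (pvTpd topics days).toNat
          = topics.drop ((d + 1 - 1) * pvTpd topics days).toNat := by
        rw [List.drop_drop]
        congr 1
        omega
      rw [hdd]
      exact ih (d + 1) (by omega) (by omega)

-- ===== VERDICT (by name: the statement is the Claim_ definition above) =====
theorem distribute_to_days_py_spec : Claim_equal_distribute_to_days_py := by
  intro topics days hdom hpre
  unfold Spec_distribute_to_days_py
  by_cases h : topics = []
  · simp [distribute_to_days_py, distribute_to_days_py_alt, h]
  · have hch := pvChunks_eq topics days (pvNd topics days + 1 - 1).toNat 1 le_rfl rfl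
    simp only [show ((1:Int)-1) = 0 from rfl, zero_mul, Int.toNat_zero, List.drop_zero] at hch
    unfold distribute_to_days_py distribute_to_days_py_alt
    rw [if_neg h, if_neg h]
    show ((PySem.List.pyRange 1 (pvNd topics days + 1) 1).foldl
        (fun daily_dist day =>
          daily_dist.insert (pvDayKey day)
            (PySem.List.slice topics (some ((day - 1) * pvTpd topics days))
              (some (min ((day - 1) * pvTpd topics days + pvTpd topics days)
                (PySem.List.len topics)))))
        PySem.Dict.empty).items
      = (PySem.Dict.ofList (pvChunks (pvTpd topics days) (pvNd topics days) topics 1)).items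
    rw [hch]
    have hof : PySem.Dict.ofList
        ((PySem.List.pyRange 1 (pvNd topics days + 1) 1).map (pvEntry topics days))
        = ((PySem.List.pyRange 1 (pvNd topics days + 1) 1).map (pvEntry topics days)).foldl
          (fun dd p => dd.insert p.1 p.2) PySem.Dict.empty := rfl
    rw [hof, List.foldl_map]
    rfl
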